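-- pv_equiv track=rewrite | github.com/iamchugunov/yakor_interpolator | function.py | func_emissions_theta
-- ===== SOURCE A (Python) =====
-- def func_emissions_theta(theta_meas, thres_theta):
--     bad_ind = []
--     for i in range(1, len(theta_meas) - 1):
--         theta_diff_prev = theta_meas[i] - theta_meas[i - 1]
--         theta_diff_next = theta_meas[i] - theta_meas[i + 1]
--         if abs(theta_diff_prev) > thres_theta and abs(theta_diff_next) > thres_theta:
--             bad_ind.append(i)
--     return bad_ind
-- ===== SOURCE B (Python) =====
-- def func_emissions_theta(theta_meas, thres_theta):
--     # Stage 1: positions j where the step theta[j] -> theta[j+1] is a big jump.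
--     jumps = [j for j in range(len(theta_meas) - 1)
--              if abs(theta_meas[j + 1] - theta_meas[j]) > thres_theta]
--     # Stage 2: an index is bad exactly when two big jumps are consecutive.
--     return [q for p, q in zip(jumps, jumps[1:]) if q == p + 1]
-- ===== Notes on version B (the rewrite author's own statement) =====
-- stated objective: alternative
-- what changed: B first extracts the sparse list of big-jump step positions, then scans that jump list for adjacent pairs of consecutive positions, instead of a single pass testing both neighbour differences at every interior index.
import Mathlib
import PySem

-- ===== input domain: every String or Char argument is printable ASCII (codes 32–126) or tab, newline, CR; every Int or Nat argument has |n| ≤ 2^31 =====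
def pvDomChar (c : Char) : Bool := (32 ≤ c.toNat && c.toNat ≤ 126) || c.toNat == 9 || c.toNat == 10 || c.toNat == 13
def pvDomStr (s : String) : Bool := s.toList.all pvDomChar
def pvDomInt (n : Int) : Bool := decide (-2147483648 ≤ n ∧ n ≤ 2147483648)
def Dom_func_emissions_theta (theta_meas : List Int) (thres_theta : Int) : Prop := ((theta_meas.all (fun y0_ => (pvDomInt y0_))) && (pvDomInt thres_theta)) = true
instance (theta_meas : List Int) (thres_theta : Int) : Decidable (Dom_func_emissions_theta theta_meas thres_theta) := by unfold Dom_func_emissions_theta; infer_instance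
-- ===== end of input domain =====

-- B stages the work: it first collects the sparse list of big-jump step positions, then scans that list for adjacent consecutive pairs (alternative decomposition, same asymptotic cost).


-- ===== PORT A =====
def func_emissions_theta (theta_meas : List Int) (thres_theta : Int) : List Int :=
  (PySem.List.pyRange 1 ((theta_meas.length : Int) - 1) 1).foldl (fun bad_ind i =>
    let theta_diff_prev := PySem.List.pyGetD theta_meas i 0 - PySem.List.pyGetD theta_meas (i - 1) 0
    let theta_diff_next := PySem.List.pyGetD theta_meas i 0 - PySem.List.pyGetD theta_meas (i + 1) 0
    if |theta_diff_prev| > thres_theta ∧ |theta_diff_next| > thres_theta then bad_ind ++ [i] else bad_ind) []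

-- ===== PORT B =====
def func_emissions_theta_alt (theta_meas : List Int) (thres_theta : Int) : List Int :=
  let jumps := (PySem.List.pyRange 0 ((theta_meas.length : Int) - 1) 1).filter (fun j =>
    decide (|PySem.List.pyGetD theta_meas (j + 1) 0 - PySem.List.pyGetD theta_meas j 0| > thres_theta))
  (List.zip jumps (jumps.drop 1)).filterMap (fun pq =>
    if pq.2 = pq.1 + 1 then some pq.2 else none)

-- ===== PRECONDITION & SPEC =====
def Spec_func_emissions_theta (theta_meas : List Int) (thres_theta : Int) (out : List Int) : Prop := out = func_emissions_theta_alt theta_meas thres_theta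
instance (theta_meas : List Int) (thres_theta : Int) (out : List Int) : Decidable (Spec_func_emissions_theta theta_meas thres_theta out) := by unfold Spec_func_emissions_theta; infer_instance

-- ===== CLAIM (what is proved, stated in full; the proofs are below) =====
def Claim_equal_func_emissions_theta : Prop := ∀ (theta_meas : List Int) (thres_theta : Int), Dom_func_emissions_theta theta_meas thres_theta → Spec_func_emissions_theta theta_meas thres_theta (func_emissions_theta theta_meas thres_theta)

-- ===== LEMMAS AND PROOFS =====

-- adjacent-pair scan, named for the lemmas below (definitionally B's filterMap-over-zip)
def pvAdj (l : List Int) : List Int :=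
  (List.zip l (l.drop 1)).filterMap (fun pq => if pq.2 = pq.1 + 1 then some pq.2 else none)

lemma pvAdj_cons_cons (x m : Int) (M : List Int) :
    pvAdj (x :: m :: M) = (if m = x + 1 then [m] else []) ++ pvAdj (m :: M) := by
  simp only [pvAdj, List.drop_succ_cons, List.drop_zero, List.zip_cons_cons, List.filterMap_cons]
  split_ifs <;> simp

-- in a consecutive run, everything after the head is strictly larger
lemma pvConsec_gt : ∀ (y : Int) (rest : List Int),
    List.IsChain (fun a b => b = a + 1) (y :: rest) → ∀ m ∈ rest, y < m := by
  intro y rest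
  induction rest generalizing y with
  | nil => intro _ m hm; cases hm
  | cons z rest ih =>
    intro h m hm
    rcases List.isChain_cons_cons.mp h with ⟨hz, h'⟩
    rcases List.mem_cons.mp hm with rfl | hm'
    · omega
    · have := ih z h' m hm'; omega

-- key: the adjacency scan over a filtered consecutive run = the direct two-neighbour filter
lemma pvAdj_filter (P : Int → Bool) : ∀ (l : List Int),
    List.IsChain (fun a b => b = a + 1) l →
    pvAdj (l.filter P) = (l.drop 1).filter (fun i => P (i - 1) && P i) := by
  intro l
  induction l with
  | nil => intro _; simp [pvAdj]
  | cons x l ih =>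
    intro h
    cases l with
    | nil =>
      by_cases hx : P x <;> simp [hx, pvAdj]
    | cons y rest =>
      rcases List.isChain_cons_cons.mp h with ⟨hy, h'⟩
      have IH := ih h'
      by_cases hx : P x
      · by_cases hyP : P y
        · have hfil : List.filter P (x :: y :: rest) = x :: y :: List.filter P rest := by
            rw [List.filter_cons_of_pos (by simp [hx]), List.filter_cons_of_pos (by simp [hyP])]
          have hIH : pvAdj (List.filter P (y :: rest)) = List.filter (fun i => P (i - 1) && P i) rest := by
            simpa using IH
          rw [List.filter_cons_of_pos (by simp [hyP])] at hIH
          rw [hfil, pvAdj_cons_cons, if_pos hy, hIH]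
          have hcond : (P (y - 1) && P y) = true := by
            have h1 : y - 1 = x := by omega
            simp [h1, hx, hyP]
          simp [hcond]
        · -- P x true, P y false: head of filtered tail (if any) is > x+1, so no adjacent pair with x
          have hfil : List.filter P (x :: y :: rest) = x :: List.filter P rest := by
            rw [List.filter_cons_of_pos (by simp [hx]), List.filter_cons_of_neg (by simp [hyP])]
          have hIH : pvAdj (List.filter P rest) = List.filter (fun i => P (i - 1) && P i) rest := by
            rw [← List.filter_cons_of_neg (l := rest) (a := y) (p := P) (by simp [hyP])]
            simpa using IH
          rw [hfil]
          have hadj : pvAdj (x :: List.filter P rest) = pvAdj (List.filter P rest) := by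
            cases hM : List.filter P rest with
            | nil => simp [pvAdj]
            | cons m M =>
              have hm : m ∈ rest := by
                have : m ∈ List.filter P rest := by rw [hM]; exact List.mem_cons_self
                exact List.mem_of_mem_filter this
              have hgt : y < m := pvConsec_gt y rest h' m hm
              have hne : ¬ (m = x + 1) := by omega
              rw [pvAdj_cons_cons, if_neg hne]
              simp
          rw [hadj, hIH]
          have hcond : (P (y - 1) && P y) = false := by simp [hyP]
          simp [hcond]
      · -- P x false
        have hfil : List.filter P (x :: y :: rest) = List.filter P (y :: rest) := by
          rw [List.filter_cons_of_neg (by simp [hx])]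
        rw [hfil, IH]
        have hcond : (P (y - 1) && P y) = false := by
          have : y - 1 = x := by omega
          simp [this, hx]
        simp [hcond]

-- pyRange with step 1 is a consecutive run
lemma pvConsec_pyRange : ∀ (n : ℕ) (a b : Int), (b - a).toNat = n →
    List.IsChain (fun x y => y = x + 1) (PySem.List.pyRange a b 1) := by
  intro n
  induction n with
  | zero =>
    intro a b h
    rw [PySem.List.pyRange_one_eq_nil (by omega)]
    exact List.isChain_nil
  | succ k ih =>
    intro a b h
    rw [PySem.List.pyRange_one_cons (by omega)]
    by_cases hab : a + 1 < b
    · rw [PySem.List.pyRange_one_cons hab]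
      exact List.isChain_cons_cons.mpr ⟨rfl, by
        have := ih (a + 1) b (by omega)
        rwa [PySem.List.pyRange_one_cons hab] at this⟩
    · rw [PySem.List.pyRange_one_eq_nil (by omega)]
      exact List.isChain_singleton _

-- ===== VERDICT (by name: the statement is the Claim_ definition above) =====
theorem func_emissions_theta_spec : Claim_equal_func_emissions_theta := by
  intro xs t _
  unfold Spec_func_emissions_theta func_emissions_theta func_emissions_theta_alt
  rw [PySem.List.foldl_append_ite_eq_filter]
  simp only [List.nil_append]
  set Q : Int → Bool := fun j =>
    decide (|PySem.List.pyGetD xs (j + 1) 0 - PySem.List.pyGetD xs j 0| > t) with hQ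
  have hkey := pvAdj_filter Q (PySem.List.pyRange 0 ((xs.length : Int) - 1) 1)
    (pvConsec_pyRange (((xs.length : Int) - 1) - 0).toNat 0 ((xs.length : Int) - 1) rfl)
  have hdrop : (PySem.List.pyRange 0 ((xs.length : Int) - 1) 1).drop 1
      = PySem.List.pyRange 1 ((xs.length : Int) - 1) 1 := by
    by_cases h0 : (0 : Int) < (xs.length : Int) - 1
    · rw [PySem.List.pyRange_one_cons h0]; simp
    · rw [PySem.List.pyRange_one_eq_nil (by omega), PySem.List.pyRange_one_eq_nil (by omega)]
      simp
  show _ = pvAdj _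
  rw [hkey, hdrop]
  refine List.filter_congr ?_
  intro i _
  rw [hQ]
  simp only [show i - 1 + 1 = i from by omega]
  rw [show |PySem.List.pyGetD xs (i + 1) 0 - PySem.List.pyGetD xs i 0|
      = |PySem.List.pyGetD xs i 0 - PySem.List.pyGetD xs (i + 1) 0| from abs_sub_comm _ _]
  exact Bool.decide_and _ _
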